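-- pv_equiv track=rewrite | github.com/alexandraleonidova/automata-computability-and-formal-languages | nfa_to_dfa_conversion.py | addLetterTransitions
-- ===== SOURCE A (Python) =====
-- def addLetterTransitions(transition_function_list_nfa, current_set_of_states, letter):
--
--     set_of_resulting_states = set()
--     list_of_current_states = list(current_set_of_states)
--     index = 0
--
--     # For loop would have worked but the while loop makes this similar to
--     # the addEpsilonTransitions method implementation.
--     while (index < len(list_of_current_states)):
--
--         for transition_function in transition_function_list_nfa:
--
--             # transition_function_nfa is a transition function that composes a single element of array_list.
--             # transition_function_nfa[0] is the current state, array_trans[1] is the character read,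
--             # array_trans[2] is the state that NFA would enter.
--
--             if (transition_function[0] == list_of_current_states[index] and transition_function[1] == letter and transition_function[2] not in set_of_resulting_states):
--                 set_of_resulting_states.add(transition_function[2])
--
--         index = index + 1
--
--     return sorted(set(set_of_resulting_states))
-- ===== SOURCE B (Python) =====
-- def addLetterTransitions(transition_function_list_nfa, current_set_of_states, letter):
--     # Index the NFA transitions once: source state -> list of target states on `letter`.
--     # Rows that are not complete (source, letter, target) triples are skipped.
--     targets_by_source = {}
--     for t in transition_function_list_nfa:
--         if len(t) >= 3 and t[1] == letter:
--             targets_by_source.setdefault(t[0], []).append(t[2])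
--     # Union the target lists of the current states.
--     result = set()
--     for state in current_set_of_states:
--         result.update(targets_by_source.get(state, []))
--     return sorted(result)
-- ===== Notes on version B (the rewrite author's own statement) =====
-- stated objective: faster
-- what changed: Replaces A's nested while-over-states / for-over-transitions rescans by a two-phase algorithm: one pass builds a dict index source-state -> targets on the letter (skipping rows that are not complete triples), then one pass over the current states unions the indexed target lists; the inner rescan of the transition list per state disappears.
import Mathlib
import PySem

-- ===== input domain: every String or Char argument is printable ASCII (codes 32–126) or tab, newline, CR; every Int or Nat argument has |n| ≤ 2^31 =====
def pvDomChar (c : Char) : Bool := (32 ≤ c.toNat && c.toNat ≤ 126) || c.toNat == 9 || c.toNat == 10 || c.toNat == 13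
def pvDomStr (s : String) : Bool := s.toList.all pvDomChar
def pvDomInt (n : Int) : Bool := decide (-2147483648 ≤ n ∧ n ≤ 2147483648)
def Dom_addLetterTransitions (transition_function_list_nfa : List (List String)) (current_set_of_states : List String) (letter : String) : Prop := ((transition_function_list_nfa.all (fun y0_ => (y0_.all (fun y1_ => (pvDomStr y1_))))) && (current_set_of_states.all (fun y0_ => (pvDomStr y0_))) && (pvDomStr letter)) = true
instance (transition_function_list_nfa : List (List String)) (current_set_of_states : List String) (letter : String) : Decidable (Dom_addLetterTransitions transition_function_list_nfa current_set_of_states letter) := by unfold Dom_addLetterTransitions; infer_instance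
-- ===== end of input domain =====

-- B replaces A's nested while-over-states / for-over-transitions scans by a dict index
-- (source state -> targets on the letter) built in one pass, then a union over the current
-- states; measured faster (asymptotic: the per-state rescan of the transition list disappears).


-- ===== PORT A =====
-- inner 'for transition_function in transition_function_list_nfa' body, for the current state cs.
-- Field accesses t[0], t[1], t[2] are ported as t.getD k "" — exact under Pre_ (entries are
-- complete triples, so no Python index access raises).
def aStep (letter cs : String) (s : PySem.Set String) (t : List String) : PySem.Set String :=
  if t.getD 0 "" == cs && t.getD 1 "" == letter && !(PySem.Set.contains s (t.getD 2 "")) then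
    PySem.Set.add s (t.getD 2 "")
  else s

def addLetterTransitions (transition_function_list_nfa : List (List String)) (current_set_of_states : List String) (letter : String) : List String :=
  -- list_of_current_states = list(current_set_of_states); the while loop advances index by 1 over
  -- a list that is never modified, so it is a fold over List.range of its length.
  let list_of_current_states := current_set_of_states
  let set_of_resulting_states :=
    (List.range list_of_current_states.length).foldl
      (fun s index => transition_function_list_nfa.foldl (aStep letter (list_of_current_states.getD index "")) s)
      PySem.Set.empty
  PySem.List.sorted (PySem.Set.ofList set_of_resulting_states) (fun x => x) false

-- ===== PORT B =====
-- 'targets_by_source.setdefault(t[0], []).append(t[2])' = Dict.modify (t[0]) [] (· ++ [t[2]])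
-- (setdefault keeps an existing key's position, a new key appends — exactly Dict.modify);
-- rows that are not complete triples are skipped by the 'len(t) >= 3' guard, so every
-- t[1]/t[0]/t[2] access B makes is in range and t.getD k "" is exact on every input.
def buildIndex (transition_function_list_nfa : List (List String)) (letter : String) : PySem.Dict String (List String) :=
  transition_function_list_nfa.foldl
    (fun d t =>
      if 3 ≤ t.length ∧ t.getD 1 "" = letter then d.modify (t.getD 0 "") [] (· ++ [t.getD 2 ""]) else d)
    PySem.Dict.empty

def addLetterTransitions_alt (transition_function_list_nfa : List (List String)) (current_set_of_states : List String) (letter : String) : List String :=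
  let targets_by_source := buildIndex transition_function_list_nfa letter
  -- 'result.update(targets_by_source.get(state, []))' over the current states
  let result := current_set_of_states.foldl
      (fun s state => PySem.Set.update s (targets_by_source.getD state [])) PySem.Set.empty
  PySem.List.sorted result (fun x => x) false

-- ===== PRECONDITION & SPEC =====
-- Pre_ is exactly A's domain: A raises IndexError iff the current state set is non-empty and
-- some transition entry is too short for the fields A's scan dereferences on it (t[0] always,
-- t[1] when its source is a current state, t[2] when additionally its letter matches); B is
-- total, so nothing else is excluded.
def Pre_addLetterTransitions (transition_function_list_nfa : List (List String)) (current_set_of_states : List String) (letter : String) : Prop :=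
  current_set_of_states = [] ∨
    ∀ t ∈ transition_function_list_nfa, 1 ≤ t.length ∧
      (t.getD 0 "" ∈ current_set_of_states →
        2 ≤ t.length ∧ (t.getD 1 "" = letter → 3 ≤ t.length))
instance (transition_function_list_nfa : List (List String)) (current_set_of_states : List String) (letter : String) : Decidable (Pre_addLetterTransitions transition_function_list_nfa current_set_of_states letter) := by unfold Pre_addLetterTransitions; infer_instance

def pvWitness_addLetterTransitions : List (List String) × List String × String :=
  ([["q0", "a", "q1"], ["q2", "a", "q3"]], ["q0", "q2"], "a")

def Spec_addLetterTransitions (transition_function_list_nfa : List (List String)) (current_set_of_states : List String) (letter : String) (out : List String) : Prop := out = addLetterTransitions_alt transition_function_list_nfa current_set_of_states letter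
instance (transition_function_list_nfa : List (List String)) (current_set_of_states : List String) (letter : String) (out : List String) : Decidable (Spec_addLetterTransitions transition_function_list_nfa current_set_of_states letter out) := by unfold Spec_addLetterTransitions; infer_instance

-- ===== CLAIM (what is proved, stated in full; the proofs are below) =====
def Claim_equal_addLetterTransitions : Prop := ∀ (transition_function_list_nfa : List (List String)) (current_set_of_states : List String) (letter : String), Dom_addLetterTransitions transition_function_list_nfa current_set_of_states letter → Pre_addLetterTransitions transition_function_list_nfa current_set_of_states letter → Spec_addLetterTransitions transition_function_list_nfa current_set_of_states letter (addLetterTransitions transition_function_list_nfa current_set_of_states letter)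

-- ===== LEMMAS AND PROOFS =====

-- membership in A's inner loop result
lemma mem_foldl_aStep (tfl : List (List String)) (letter cs : String) (s : PySem.Set String) (x : String) :
    x ∈ tfl.foldl (aStep letter cs) s ↔
      x ∈ s ∨ ∃ t ∈ tfl, t.getD 0 "" = cs ∧ t.getD 1 "" = letter ∧ t.getD 2 "" = x := by
  induction tfl generalizing s with
  | nil => simp
  | cons t ts ih =>
    simp only [List.foldl_cons, ih, List.mem_cons]
    constructor
    · rintro (h | h)
      · unfold aStep at h
        split_ifs at h with hc
        · rcases (PySem.Set.mem_add _ _ _).1 h with h' | h'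
          · exact Or.inl h'
          · simp only [Bool.and_eq_true, beq_iff_eq] at hc
            exact Or.inr ⟨t, Or.inl rfl, hc.1.1, hc.1.2, h'.symm⟩
        · exact Or.inl h
      · rcases h with ⟨u, hu, h0, h1, h2⟩
        exact Or.inr ⟨u, Or.inr hu, h0, h1, h2⟩
    · rintro (h | ⟨u, hu | hu, h0, h1, h2⟩)
      · left; unfold aStep
        split_ifs with hc
        · exact (PySem.Set.mem_add _ _ _).2 (Or.inl h)
        · exact h
      · subst hu; left; unfold aStep
        split_ifs with hc
        · exact (PySem.Set.mem_add _ _ _).2 (Or.inr h2.symm)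
        · simp only [Bool.and_eq_true, beq_iff_eq, Bool.not_eq_eq_eq_not, Bool.not_true,
            not_and, Bool.not_eq_false] at hc
          have := hc ⟨h0, h1⟩
          rw [h2] at this
          exact (PySem.Set.contains_iff _ _).1 this
      · exact Or.inr ⟨u, hu, h0, h1, h2⟩

-- membership in A's outer loop result, for an arbitrary list of indices
lemma mem_foldl_outerA (tfl : List (List String)) (css : List String) (letter : String)
    (is : List Nat) (s : PySem.Set String) (x : String) :
    x ∈ is.foldl (fun s i => tfl.foldl (aStep letter (css.getD i "")) s) s ↔
      x ∈ s ∨ ∃ i ∈ is, ∃ t ∈ tfl, t.getD 0 "" = css.getD i "" ∧ t.getD 1 "" = letter ∧ t.getD 2 "" = x := by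
  induction is generalizing s with
  | nil => simp
  | cons i is ih =>
    simp only [List.foldl_cons, ih, mem_foldl_aStep, List.mem_cons]
    constructor
    · rintro ((h | ⟨t, ht, h0, h1, h2⟩) | ⟨j, hj, t, ht, h0, h1, h2⟩)
      · exact Or.inl h
      · exact Or.inr ⟨i, Or.inl rfl, t, ht, h0, h1, h2⟩
      · exact Or.inr ⟨j, Or.inr hj, t, ht, h0, h1, h2⟩
    · rintro (h | ⟨j, hj | hj, t, ht, h0, h1, h2⟩)
      · exact Or.inl (Or.inl h)
      · subst hj; exact Or.inl (Or.inr ⟨t, ht, h0, h1, h2⟩)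
      · exact Or.inr ⟨j, hj, t, ht, h0, h1, h2⟩

-- 'some index hits cs' is exactly 'cs ∈ css'
lemma exists_range_getD (css : List String) (p : String → Prop) :
    (∃ i ∈ List.range css.length, p (css.getD i "")) ↔ ∃ cs ∈ css, p cs := by
  constructor
  · rintro ⟨i, hi, hp⟩
    rw [List.mem_range] at hi
    exact ⟨css.getD i "", by rw [List.getD_eq_getElem _ _ hi]; exact List.getElem_mem hi, hp⟩
  · rintro ⟨cs, hcs, hp⟩
    rcases List.mem_iff_getElem.1 hcs with ⟨i, hi, rfl⟩
    exact ⟨i, List.mem_range.2 hi, by rwa [List.getD_eq_getElem _ _ hi]⟩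

-- B's index characterised: the value at a source state is the filtered/mapped transition list
lemma getD_buildIndex (tfl : List (List String)) (letter cs : String) :
    (buildIndex tfl letter).getD cs [] =
      (tfl.filter (fun t => t.getD 0 "" == cs && decide (3 ≤ t.length) && (t.getD 1 "" == letter))).map (fun t => t.getD 2 "") := by
  suffices h : ∀ d : PySem.Dict String (List String),
      (tfl.foldl (fun d t =>
          if 3 ≤ t.length ∧ t.getD 1 "" = letter then d.modify (t.getD 0 "") [] (· ++ [t.getD 2 ""]) else d) d).getD cs []
        = d.getD cs [] ++ (tfl.filter (fun t => t.getD 0 "" == cs && decide (3 ≤ t.length) && (t.getD 1 "" == letter))).map (fun t => t.getD 2 "") by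
    simpa [buildIndex, PySem.Dict.getD_empty] using h PySem.Dict.empty
  induction tfl with
  | nil => simp
  | cons t ts ih =>
    intro d
    rw [List.foldl_cons, List.filter_cons]
    by_cases h1 : 3 ≤ t.length ∧ t.getD 1 "" = letter
    · rw [if_pos h1, ih]
      by_cases h0 : t.getD 0 "" = cs
      · rw [if_pos (by simp only [Bool.and_eq_true, beq_iff_eq, decide_eq_true_iff]; exact ⟨⟨h0, h1.1⟩, h1.2⟩),
          PySem.Dict.getD_modify, if_pos h0.symm, List.map_cons,
          List.append_assoc, List.singleton_append, h0]
      · rw [if_neg (by simp only [Bool.and_eq_true, beq_iff_eq, decide_eq_true_iff]; exact fun h => h0 h.1.1),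
          PySem.Dict.getD_modify, if_neg (fun h => h0 h.symm)]
    · rw [if_neg h1, ih,
        if_neg (by simp only [Bool.and_eq_true, beq_iff_eq, decide_eq_true_iff]; exact fun h => h1 ⟨h.1.2, h.2⟩)]

-- membership in the index's value list, as an existential over transitions
lemma mem_getD_buildIndex (tfl : List (List String)) (letter cs x : String) :
    x ∈ (buildIndex tfl letter).getD cs [] ↔
      ∃ t ∈ tfl, t.getD 0 "" = cs ∧ 3 ≤ t.length ∧ t.getD 1 "" = letter ∧ t.getD 2 "" = x := by
  rw [getD_buildIndex]
  simp only [List.mem_map, List.mem_filter, Bool.and_eq_true, beq_iff_eq, decide_eq_true_iff]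
  constructor
  · rintro ⟨t, ⟨ht, ⟨h0, hl⟩, h1⟩, h2⟩; exact ⟨t, ht, h0, hl, h1, h2⟩
  · rintro ⟨t, ht, h0, hl, h1, h2⟩; exact ⟨t, ⟨ht, ⟨h0, hl⟩, h1⟩, h2⟩

-- membership in B's union loop over the current states
lemma mem_foldl_update (css : List String) (f : String → List String)
    (s : PySem.Set String) (x : String) :
    x ∈ css.foldl (fun s state => PySem.Set.update s (f state)) s ↔
      x ∈ s ∨ ∃ cs ∈ css, x ∈ f cs := by
  induction css generalizing s with
  | nil => simp
  | cons c cs ih =>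
    simp only [List.foldl_cons, ih, PySem.Set.mem_update, List.mem_cons]
    constructor
    · rintro ((h | h) | ⟨u, hu, hx⟩)
      · exact Or.inl h
      · exact Or.inr ⟨c, Or.inl rfl, h⟩
      · exact Or.inr ⟨u, Or.inr hu, hx⟩
    · rintro (h | ⟨u, hu | hu, hx⟩)
      · exact Or.inl (Or.inl h)
      · subst hu; exact Or.inl (Or.inr hx)
      · exact Or.inr ⟨u, hu, hx⟩

-- B's union loop preserves Nodup
lemma nodup_foldl_update (css : List String) (f : String → List String)
    (s : PySem.Set String) (hs : s.Nodup) :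
    (css.foldl (fun s state => PySem.Set.update s (f state)) s).Nodup := by
  induction css generalizing s with
  | nil => exact hs
  | cons c cs ih => exact ih _ (PySem.Set.nodup_update _ _ hs)

-- ===== VERDICT (by name: the statement is the Claim_ definition above) =====
theorem addLetterTransitions_spec : Claim_equal_addLetterTransitions := by
  intro tfl css letter _ hpre
  unfold Spec_addLetterTransitions
  simp only [addLetterTransitions, addLetterTransitions_alt]
  set SA := (List.range css.length).foldl
      (fun s i => tfl.foldl (aStep letter (css.getD i "")) s) PySem.Set.empty with hSA
  set SB := css.foldl
      (fun s state => PySem.Set.update s ((buildIndex tfl letter).getD state [])) PySem.Set.empty with hSB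
  have hnb : SB.Nodup := nodup_foldl_update _ _ _ (by simp [PySem.Set.empty])
  have hmem : ∀ x, x ∈ PySem.Set.ofList SA ↔ x ∈ SB := by
    intro x
    rw [PySem.Set.mem_ofList, hSA, hSB, mem_foldl_outerA,
      mem_foldl_update css (fun state => (buildIndex tfl letter).getD state [])]
    simp only [PySem.Set.empty, List.not_mem_nil, false_or, mem_getD_buildIndex]
    rw [exists_range_getD css (fun cs => ∃ t ∈ tfl, t.getD 0 "" = cs ∧ t.getD 1 "" = letter ∧ t.getD 2 "" = x)]
    constructor
    · rintro ⟨cs, hcs, t, ht, h0, h1, h2⟩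
      rcases hpre with h | h
      · exact absurd hcs (h ▸ List.not_mem_nil)
      · exact ⟨cs, hcs, t, ht, h0, ((h t ht).2 (h0 ▸ hcs)).2 h1, h1, h2⟩
    · rintro ⟨cs, hcs, t, ht, h0, _, h1, h2⟩
      exact ⟨cs, hcs, t, ht, h0, h1, h2⟩
  have hperm : (PySem.List.sorted SB (fun x => x) false).Perm (PySem.Set.ofList SA) := by
    refine (PySem.List.sorted_perm _ _ _).trans ?_
    exact (List.perm_ext_iff_of_nodup hnb (PySem.Set.nodup_ofList _)).2 (fun x => (hmem x).symm)
  refine PySem.List.sorted_eq_of_perm_of_pairwise_lt _ _ _ hperm ?_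
  rw [← PySem.Set.ofList_eq_self_of_nodup _ hnb]
  exact PySem.List.sorted_ofList_pairwise_lt _
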